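-- pv_equiv track=rewrite | github.com/rubelw/OSSS | src/OSSS/ai/agents/query_data/handlers/consequence_types_handler.py | _select_consequence_types_fields
-- ===== SOURCE A (Python) =====
-- from typing import Any, Dict, List, Sequence
--
-- def _select_consequence_types_fields(
--     rows: Sequence[Dict[str, Any]],
-- ) -> List[str]:
--     if not rows:
--         return []
--
--     preferred_order = [
--         "id",
--         "consequence_type_code",
--         "name",
--         "short_name",
--         "description",
--         "severity_level",      # low, medium, high
--         "default_duration",
--         "default_duration_units",
--         "is_active",
--         "created_at",
--         "updated_at",
--     ]
--
--     all_keys: List[str] = []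
--     for r in rows:
--         for k in r.keys():
--             if k not in all_keys:
--                 all_keys.append(k)
--
--     ordered = [k for k in preferred_order if k in all_keys]
--     ordered.extend(k for k in all_keys if k not in ordered)
--     return ordered
-- ===== SOURCE B (Python) =====
-- from typing import Any, Dict, List, Sequence
--
-- def _select_consequence_types_fields(
--     rows: Sequence[Dict[str, Any]],
-- ) -> List[str]:
--     if not rows:
--         return []
--
--     preferred_order = [
--         "id",
--         "consequence_type_code",
--         "name",
--         "short_name",
--         "description",
--         "severity_level",
--         "default_duration",
--         "default_duration_units",
--         "is_active",
--         "created_at",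
--         "updated_at",
--     ]
--
--     # one pass: record each key's first-seen index (dedups and orders at once)
--     first_seen: Dict[str, int] = {}
--     for r in rows:
--         for k in r.keys():
--             if k not in first_seen:
--                 first_seen[k] = len(first_seen)
--
--     rank = {k: i for i, k in enumerate(preferred_order)}
--     n = len(preferred_order)
--     return sorted(first_seen, key=lambda k: (rank.get(k, n), first_seen[k]))
-- ===== Notes on version B (the rewrite author's own statement) =====
-- stated objective: faster
-- what changed: Replaces A's membership-scanned all_keys list and two filter passes by a single pass recording each key's first-seen index in a dict, a rank table for the preferred order, and one stable sort by the composite key (rank, first_seen).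
import Mathlib
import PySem

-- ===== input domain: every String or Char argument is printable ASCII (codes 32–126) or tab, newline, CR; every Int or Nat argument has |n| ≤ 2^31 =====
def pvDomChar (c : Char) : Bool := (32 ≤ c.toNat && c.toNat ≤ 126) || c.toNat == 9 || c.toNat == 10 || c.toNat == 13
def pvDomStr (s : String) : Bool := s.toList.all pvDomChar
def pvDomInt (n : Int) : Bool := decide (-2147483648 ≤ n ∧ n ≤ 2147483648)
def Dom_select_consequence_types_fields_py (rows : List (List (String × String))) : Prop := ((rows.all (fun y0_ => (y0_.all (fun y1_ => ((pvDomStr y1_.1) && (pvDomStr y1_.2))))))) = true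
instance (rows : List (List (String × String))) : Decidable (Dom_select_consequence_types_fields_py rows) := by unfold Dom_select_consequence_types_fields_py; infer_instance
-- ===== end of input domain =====

-- B replaces A's membership-scanned key list and two filter passes by one first-seen-index
-- dict, a rank table and a single stable sort on the composite key (rank, first-seen index).

-- the preferred_order literal, shared verbatim by both Pythons
def pvPreferred : List String :=
  ["id", "consequence_type_code", "name", "short_name", "description", "severity_level",
   "default_duration", "default_duration_units", "is_active", "created_at", "updated_at"]

-- ===== PORT A =====
def select_consequence_types_fields_py (rows : List (List (String × String))) : List String :=
  if rows = [] then [] else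
    let all_keys : List String :=
      rows.foldl (fun acc r =>
        r.foldl (fun acc2 kv => if acc2.contains kv.1 then acc2 else acc2 ++ [kv.1]) acc) []
    let ordered : List String :=
      pvPreferred.foldl (fun acc k => if all_keys.contains k then acc ++ [k] else acc) []
    -- ordered.extend(k for k in all_keys if k not in ordered): the generator reads the growing list
    all_keys.foldl (fun acc k => if acc.contains k then acc else acc ++ [k]) ordered

-- ===== PORT B =====
def select_consequence_types_fields_py_alt (rows : List (List (String × String))) : List String :=
  if rows = [] then [] else
    let first_seen : PySem.Dict String Int :=
      rows.foldl (fun d r =>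
        r.foldl (fun d2 kv => if d2.contains kv.1 then d2 else d2.insert kv.1 (Int.ofNat d2.size)) d)
        PySem.Dict.empty
    let rank : PySem.Dict String Int :=
      (PySem.List.enumerate pvPreferred).foldl (fun d p => d.insert p.2 p.1) PySem.Dict.empty
    let n : Int := Int.ofNat pvPreferred.length
    PySem.List.sorted2 first_seen.keys
      (fun k => rank.getD k n) (fun k => first_seen.getD k 0) false

-- ===== PRECONDITION & SPEC =====
def Spec_select_consequence_types_fields_py (rows : List (List (String × String))) (out : List String) : Prop := out = select_consequence_types_fields_py_alt rows
instance (rows : List (List (String × String))) (out : List String) : Decidable (Spec_select_consequence_types_fields_py rows out) := by unfold Spec_select_consequence_types_fields_py; infer_instance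

-- ===== CLAIM (what is proved, stated in full; the proofs are below) =====
def Claim_equal_select_consequence_types_fields_py : Prop := ∀ (rows : List (List (String × String))), Dom_select_consequence_types_fields_py rows → Spec_select_consequence_types_fields_py rows (select_consequence_types_fields_py rows)

-- ===== LEMMAS AND PROOFS =====

-- sorted2 with a strictly lexicographically increasing witness permutation
theorem pvBridge {α : Type} (xs ys : List α) (k1 k2 : α → Int)
    (hp : ys.Perm xs)
    (hw : ys.Pairwise (fun a b => k1 a < k1 b ∨ (k1 a = k1 b ∧ k2 a < k2 b))) :
    PySem.List.sorted2 xs k1 k2 false = ys := by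
  have hfun : (fun a b => decide (k1 a < k1 b) || (!decide (k1 b < k1 a) && decide (k2 a < k2 b)))
      = (fun a b => decide (toLex (k1 a, k2 a) < toLex (k1 b, k2 b))) := by
    funext a b
    by_cases h1 : k1 a < k1 b <;> by_cases h2 : k1 b < k1 a <;> by_cases h3 : k2 a < k2 b <;>
      simp [h1, h2, h3, Prod.Lex.lt_iff] <;> omega
  have h := PySem.List.sorted_eq_of_perm_of_pairwise_lt (κ := Lex (Int × Int)) xs ys
      (fun a => toLex (k1 a, k2 a)) hp
      (hw.imp (by
        intro a b hab
        rw [Prod.Lex.lt_iff]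
        simpa using hab))
  rw [← h, PySem.List.sorted_eq_foldl_insertBy]
  show List.foldl (fun acc x => PySem.List.insertBy
      (fun a b => decide (k1 a < k1 b) || (!decide (k1 b < k1 a) && decide (k2 a < k2 b))) x acc) [] xs = _
  rw [hfun]

-- the items list B's first_seen dict holds: each key of l paired with its index (offset n)
def pvFsItems (l : List String) (n : Nat) : List (String × Int) :=
  (l.zipIdx n).map (fun p => (p.1, (p.2 : Int)))

theorem pvFsKeys : ∀ (l : List String) (n : Nat), List.map (fun x => x.1) (pvFsItems l n) = l := by
  intro l
  induction l with
  | nil => intro n; rfl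
  | cons a l ih =>
    intro n
    simp only [pvFsItems, List.zipIdx_cons, List.map_cons]
    have := ih (n + 1)
    simp only [pvFsItems] at this
    simp [this]

theorem pvFsStep (d : PySem.Dict String Int) (l : List String) (k : String)
    (h : d.items = pvFsItems l 0) :
    (if d.contains k then d else d.insert k (Int.ofNat d.size)).items
      = pvFsItems (if l.contains k then l else l ++ [k]) 0 := by
  have hkeys : d.keys = l := by rw [PySem.Dict.keys, h]; exact pvFsKeys l 0
  have hcont : d.contains k = l.contains k := by
    rw [PySem.Dict.contains_eq_decide_mem_keys, hkeys]
    simp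
  by_cases hm : k ∈ l
  · have h1 : d.contains k = true := by rw [hcont]; simpa using hm
    have h2 : l.contains k = true := by simpa using hm
    rw [if_pos h1, if_pos h2]
    exact h
  · have h2 : l.contains k = false := by simpa using hm
    have h1 : d.contains k = false := by rw [hcont]; exact h2
    have hsize : d.size = l.length := by
      rw [PySem.Dict.size, h]; simp [pvFsItems]
    rw [if_neg (by simp [h1]), if_neg (by simpa using hm)]
    rw [PySem.Dict.items_insert_of_not_contains d _ h1, h, hsize]
    simp [pvFsItems, List.zipIdx_append, List.zipIdx_cons]

theorem pvFsFoldInner : ∀ (r : List (String × String)) (d : PySem.Dict String Int) (l : List String),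
    d.items = pvFsItems l 0 →
    (r.foldl (fun d2 kv => if d2.contains kv.1 then d2 else d2.insert kv.1 (Int.ofNat d2.size)) d).items
      = pvFsItems (r.foldl (fun acc2 kv => if acc2.contains kv.1 then acc2 else acc2 ++ [kv.1]) l) 0 := by
  intro r
  induction r with
  | nil => intro d l h; exact h
  | cons kv r ih => intro d l h; exact ih _ _ (pvFsStep d l kv.1 h)

theorem pvFsFold : ∀ (rows : List (List (String × String))) (d : PySem.Dict String Int) (l : List String),
    d.items = pvFsItems l 0 →
    (rows.foldl (fun d r =>
        r.foldl (fun d2 kv => if d2.contains kv.1 then d2 else d2.insert kv.1 (Int.ofNat d2.size)) d) d).items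
      = pvFsItems (rows.foldl (fun acc r =>
        r.foldl (fun acc2 kv => if acc2.contains kv.1 then acc2 else acc2 ++ [kv.1]) acc) l) 0 := by
  intro rows
  induction rows with
  | nil => intro d l h; exact h
  | cons r rows ih => intro d l h; exact ih _ _ (pvFsFoldInner r d l h)

theorem pvNodupInner : ∀ (r : List (String × String)) (l : List String), l.Nodup →
    (r.foldl (fun acc2 kv => if acc2.contains kv.1 then acc2 else acc2 ++ [kv.1]) l).Nodup := by
  intro r
  induction r with
  | nil => intro l h; exact h
  | cons kv r ih =>
    intro l h
    refine ih _ ?_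
    show (if l.contains kv.1 = true then l else l ++ [kv.1]).Nodup
    by_cases hk : kv.1 ∈ l
    · rw [if_pos (by simpa using hk)]
      exact h
    · rw [if_neg (by simpa using hk)]
      rw [List.nodup_append]
      exact ⟨h, List.nodup_singleton _, by
        intro a ha b hb
        simp only [List.mem_singleton] at hb
        subst hb
        exact fun e => hk (e ▸ ha)⟩

theorem pvNodupFold : ∀ (rows : List (List (String × String))) (l : List String), l.Nodup →
    (rows.foldl (fun acc r =>
      r.foldl (fun acc2 kv => if acc2.contains kv.1 then acc2 else acc2 ++ [kv.1]) acc) l).Nodup := by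
  intro rows
  induction rows with
  | nil => intro l h; exact h
  | cons r rows ih => intro l h; exact ih _ (pvNodupInner r l h)

-- A's lazily-evaluated extend over a duplicate-free list
theorem pvExtendDedup : ∀ (l acc : List String), l.Nodup →
    l.foldl (fun acc k => if acc.contains k then acc else acc ++ [k]) acc
      = acc ++ l.filter (fun k => !acc.contains k) := by
  intro l
  induction l with
  | nil => intro acc _; simp
  | cons k l ih =>
    intro acc hn
    rw [List.nodup_cons] at hn
    obtain ⟨hk, hl⟩ := hn
    rw [List.foldl_cons]
    show List.foldl (fun acc k => if acc.contains k = true then acc else acc ++ [k])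
        (if acc.contains k = true then acc else acc ++ [k]) l = _
    by_cases hc : k ∈ acc
    · have hcb : acc.contains k = true := by simpa using hc
      rw [if_pos hcb, ih acc hl, List.filter_cons]
      simp [hc]
    · have hcb : acc.contains k = false := by simpa using hc
      rw [if_neg (by simpa using hc), ih (acc ++ [k]) hl]
      have hfc : List.filter (fun x => !(acc ++ [k]).contains x) l
          = List.filter (fun x => !acc.contains x) l := by
        apply List.filter_congr
        intro x hx
        have hxk : x ≠ k := fun e => hk (e ▸ hx)
        simp [hxk]
      rw [hfc, List.filter_cons]
      simp [hc]

theorem pvFsMem : ∀ (l : List String) (n i : Nat), (h : i < l.length) →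
    (l[i], ((n + i : Nat) : Int)) ∈ pvFsItems l n := by
  intro l
  induction l with
  | nil => intro n i h; simp at h
  | cons a l ih =>
    intro n i h
    have hco : pvFsItems (a :: l) n = (a, (n : Int)) :: pvFsItems l (n + 1) := by
      simp [pvFsItems, List.zipIdx_cons]
    rw [hco]
    cases i with
    | zero => simp
    | succ i =>
      apply List.mem_cons_of_mem
      have harith : n + (i + 1) = (n + 1) + i := by omega
      have := ih (n + 1) i (by simpa using h)
      simpa [harith] using this
-- first-seen indices strictly increase along the key list
theorem pvFsPairwise (K : List String) (hK : K.Nodup) :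
    K.Pairwise (fun a b => (PySem.Dict.mk (pvFsItems K 0)).getD a 0
      < (PySem.Dict.mk (pvFsItems K 0)).getD b 0) := by
  rw [List.pairwise_iff_getElem]
  intro i j hi hj hij
  have hkeys : (PySem.Dict.mk (pvFsItems K 0)).keys.Nodup := by
    rw [PySem.Dict.keys_mk, pvFsKeys]; exact hK
  have h1 : (PySem.Dict.mk (pvFsItems K 0)).getD K[i] 0 = ((0 + i : Nat) : Int) :=
    PySem.Dict.getD_of_mem_items _ (pvFsMem K 0 i hi) hkeys 0
  have h2 : (PySem.Dict.mk (pvFsItems K 0)).getD K[j] 0 = ((0 + j : Nat) : Int) :=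
    PySem.Dict.getD_of_mem_items _ (pvFsMem K 0 j hj) hkeys 0
  rw [h1, h2]
  simp only [Nat.zero_add]
  exact_mod_cast hij

-- the rank dict B builds, as a literal
theorem pvRankEq : (PySem.List.enumerate pvPreferred).foldl
      (fun d p => d.insert p.2 p.1) PySem.Dict.empty
    = PySem.Dict.mk [("id", 0), ("consequence_type_code", 1), ("name", 2), ("short_name", 3),
        ("description", 4), ("severity_level", 5), ("default_duration", 6),
        ("default_duration_units", 7), ("is_active", 8), ("created_at", 9), ("updated_at", 10)] := by
  decide

theorem pvRankLt : ∀ a ∈ pvPreferred,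
    ((PySem.List.enumerate pvPreferred).foldl (fun d p => d.insert p.2 p.1) PySem.Dict.empty).getD
      a (Int.ofNat pvPreferred.length) < Int.ofNat pvPreferred.length := by
  intro a ha
  fin_cases ha <;> decide

theorem pvRankDefault : ∀ (a : String), a ∉ pvPreferred →
    ((PySem.List.enumerate pvPreferred).foldl (fun d p => d.insert p.2 p.1) PySem.Dict.empty).getD
      a (Int.ofNat pvPreferred.length) = Int.ofNat pvPreferred.length := by
  intro a ha
  rw [pvRankEq]
  simp only [pvPreferred, List.mem_cons, List.not_mem_nil, or_false, not_or] at ha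
  obtain ⟨h1, h2, h3, h4, h5, h6, h7, h8, h9, h10, h11⟩ := ha
  simp [PySem.Dict.getD, PySem.Dict.get?, beq_iff_eq,
    Ne.symm h1, Ne.symm h2, Ne.symm h3, Ne.symm h4, Ne.symm h5, Ne.symm h6,
    Ne.symm h7, Ne.symm h8, Ne.symm h9, Ne.symm h10, Ne.symm h11]

theorem pvRankPairwise : pvPreferred.Pairwise (fun a b =>
    ((PySem.List.enumerate pvPreferred).foldl (fun d p => d.insert p.2 p.1) PySem.Dict.empty).getD
        a (Int.ofNat pvPreferred.length)
      < ((PySem.List.enumerate pvPreferred).foldl (fun d p => d.insert p.2 p.1) PySem.Dict.empty).getD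
        b (Int.ofNat pvPreferred.length)) := by
  decide

-- ===== VERDICT (by name: the statement is the Claim_ definition above) =====
theorem select_consequence_types_fields_py_spec : Claim_equal_select_consequence_types_fields_py := by
  intro rows _hdom
  unfold Spec_select_consequence_types_fields_py
  by_cases h : rows = []
  · subst h; rfl
  · simp only [select_consequence_types_fields_py, select_consequence_types_fields_py_alt, if_neg h]
    set K : List String := rows.foldl (fun acc r =>
      r.foldl (fun acc2 kv => if acc2.contains kv.1 then acc2 else acc2 ++ [kv.1]) acc) [] with hKdef
    have hKnodup : K.Nodup := pvNodupFold rows [] List.nodup_nil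
    have hdict : rows.foldl (fun d r =>
        r.foldl (fun d2 kv => if d2.contains kv.1 then d2 else d2.insert kv.1 (Int.ofNat d2.size)) d)
        PySem.Dict.empty = PySem.Dict.mk (pvFsItems K 0) := by
      apply PySem.Dict.ext
      exact pvFsFold rows PySem.Dict.empty [] (by rfl)
    rw [hdict]
    have hkeys : (PySem.Dict.mk (pvFsItems K 0)).keys = K := by
      rw [PySem.Dict.keys_mk]; exact pvFsKeys K 0
    rw [hkeys]
    rw [PySem.List.foldl_append_if_eq_filter (fun k => K.contains k) pvPreferred []]
    rw [List.nil_append]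
    rw [pvExtendDedup K _ hKnodup]
    have hfc : List.filter (fun k => !(List.filter (fun k => K.contains k) pvPreferred).contains k) K
        = List.filter (fun k => !pvPreferred.contains k) K := by
      apply List.filter_congr
      intro x hx
      simp [List.mem_filter, hx]
    rw [hfc]
    -- abbreviations
    set rk : String → Int := fun k =>
      ((PySem.List.enumerate pvPreferred).foldl (fun d p => d.insert p.2 p.1) PySem.Dict.empty).getD
        k (Int.ofNat pvPreferred.length) with hrk
    set fs : String → Int := fun k => (PySem.Dict.mk (pvFsItems K 0)).getD k 0 with hfs
    have hordmem : ∀ x ∈ List.filter (fun k => K.contains k) pvPreferred, x ∈ pvPreferred := by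
      intro x hx; exact (List.mem_filter.mp hx).1
    have hexmem : ∀ x ∈ List.filter (fun k => !pvPreferred.contains k) K, x ∉ pvPreferred := by
      intro x hx
      have := (List.mem_filter.mp hx).2
      simpa using this
    have hperm : (List.filter (fun k => K.contains k) pvPreferred
        ++ List.filter (fun k => !pvPreferred.contains k) K).Perm K := by
      have hpn : pvPreferred.Nodup := by decide
      rw [List.perm_ext_iff_of_nodup ?_ hKnodup]
      · intro a
        simp only [List.mem_append, List.mem_filter]
        by_cases hap : a ∈ pvPreferred <;> by_cases hak : a ∈ K <;> simp [hap, hak]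
      · rw [List.nodup_append]
        refine ⟨hpn.filter _, hKnodup.filter _, ?_⟩
        intro a ha b hb
        exact fun e => (hexmem b hb) (e ▸ hordmem a ha)
    have hw : (List.filter (fun k => K.contains k) pvPreferred
        ++ List.filter (fun k => !pvPreferred.contains k) K).Pairwise
        (fun a b => rk a < rk b ∨ (rk a = rk b ∧ fs a < fs b)) := by
      rw [List.pairwise_append]
      refine ⟨?_, ?_, ?_⟩
      · exact List.Pairwise.imp (fun hab => Or.inl hab)
          (List.Pairwise.sublist List.filter_sublist pvRankPairwise)
      · have hp2 : (List.filter (fun k => !pvPreferred.contains k) K).Pairwise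
            (fun a b => (PySem.Dict.mk (pvFsItems K 0)).getD a 0
              < (PySem.Dict.mk (pvFsItems K 0)).getD b 0) :=
          List.Pairwise.sublist List.filter_sublist (pvFsPairwise K hKnodup)
        refine List.Pairwise.imp_of_mem ?_ hp2
        intro a b ha hb hab
        exact Or.inr ⟨by rw [hrk]; simp only []; rw [pvRankDefault a (hexmem a ha), pvRankDefault b (hexmem b hb)], hab⟩
      · intro a ha b hb
        left
        have := pvRankLt a (hordmem a ha)
        rw [hrk]; simp only []
        rw [pvRankDefault b (hexmem b hb)]
        exact this
    exact (pvBridge K _ rk fs hperm hw).symm
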